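-- pv_equiv track=rewrite | github.com/SirMrManuel0/brute-force-some-NYTimes-games | scripts/letterboxed.py | has_not_two_char_same_row
-- ===== SOURCE A (Python) =====
-- def has_not_two_char_same_row(word, letters):
--     for row in letters:
--         for index, c in enumerate(word):
--             if index == 0:
--                 continue
--             if c in row and word[index-1] in row:
--                 return False
--     return True
-- ===== SOURCE B (Python) =====
-- def has_not_two_char_same_row(word, letters):
--     rows = {}
--     for i, row in enumerate(letters):
--         for c in row:
--             rows.setdefault(c, set()).add(i)
--     empty = set()
--     for j in range(1, len(word)):
--         if rows.get(word[j], empty) & rows.get(word[j - 1], empty):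
--             return False
--     return True
-- ===== Notes on version B (the rewrite author's own statement) =====
-- stated objective: faster
-- what changed: Replaces the per-row rescan of the whole word with a one-pass char-to-row-set index built once, then a single scan over adjacent word positions testing row-set intersection.
import Mathlib
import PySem

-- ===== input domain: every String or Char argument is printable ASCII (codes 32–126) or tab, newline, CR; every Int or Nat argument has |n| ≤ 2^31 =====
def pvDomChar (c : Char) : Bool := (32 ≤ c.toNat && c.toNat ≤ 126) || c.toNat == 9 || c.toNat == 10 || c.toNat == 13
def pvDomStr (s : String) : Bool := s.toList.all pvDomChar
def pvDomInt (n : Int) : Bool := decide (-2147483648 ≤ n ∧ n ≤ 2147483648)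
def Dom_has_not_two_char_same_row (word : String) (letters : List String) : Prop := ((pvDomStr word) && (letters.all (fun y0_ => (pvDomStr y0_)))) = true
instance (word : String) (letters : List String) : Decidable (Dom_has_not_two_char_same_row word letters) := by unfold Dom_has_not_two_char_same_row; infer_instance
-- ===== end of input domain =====

-- B builds a char→row-set index once and scans adjacent word positions (one pass) instead of A's rescan of the word per row; measured faster only asymptotically, see claim.

-- ===== PORT A =====
-- 'c in row' for the single characters c / word[index-1] is exactly list membership of the char.
def has_not_two_char_same_row (word : String) (letters : List String) : Bool :=
  !(letters.any (fun row =>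
      (PySem.List.enumerate word.toList 0).any (fun p =>
        if p.1 == 0 then false
        else row.toList.contains p.2 &&
          (match PySem.List.pyGet? word.toList (p.1 - 1) with
           | some prev => row.toList.contains prev
           | none => false))))

-- ===== PORT B =====
-- rows.setdefault(c, set()).add(i) : the dict afterwards maps c to its previous set (default ∅) with i added.
def pvBuildRows (letters : List String) : PySem.Dict Char (PySem.Set Int) :=
  (PySem.List.enumerate letters 0).foldl
    (fun d p => p.2.toList.foldl
       (fun d c => d.insert c (PySem.Set.add (d.getD c PySem.Set.empty) p.1)) d)
    PySem.Dict.empty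

def has_not_two_char_same_row_alt (word : String) (letters : List String) : Bool :=
  !((PySem.List.pyRange 1 (word.toList.length) 1).any (fun j =>
      !(PySem.Set.inter
          ((pvBuildRows letters).getD (PySem.List.pyGetD word.toList j ' ') PySem.Set.empty)
          ((pvBuildRows letters).getD (PySem.List.pyGetD word.toList (j - 1) ' ') PySem.Set.empty)).isEmpty))

-- ===== PRECONDITION & SPEC =====
def Spec_has_not_two_char_same_row (word : String) (letters : List String) (out : Bool) : Prop := out = has_not_two_char_same_row_alt word letters
instance (word : String) (letters : List String) (out : Bool) : Decidable (Spec_has_not_two_char_same_row word letters out) := by unfold Spec_has_not_two_char_same_row; infer_instance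

-- ===== CLAIM (what is proved, stated in full; the proofs are below) =====
def Claim_equal_has_not_two_char_same_row : Prop := ∀ (word : String) (letters : List String), Dom_has_not_two_char_same_row word letters → Spec_has_not_two_char_same_row word letters (has_not_two_char_same_row word letters)

-- ===== LEMMAS AND PROOFS =====

-- the common Prop both programs decide: some adjacent pair of word characters shares a row
def pvBad (word : String) (letters : List String) : Prop :=
  ∃ row ∈ letters, ∃ k : Nat, 1 ≤ k ∧ k < word.toList.length ∧
    word.toList.getD k ' ' ∈ row.toList ∧ word.toList.getD (k-1) ' ' ∈ row.toList

-- inner fold over the characters of one row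
theorem pv_mem_inner (cs : List Char) (d : PySem.Dict Char (PySem.Set Int)) (i : Int)
    (c : Char) (x : Int) :
    x ∈ (cs.foldl (fun d c => d.insert c (PySem.Set.add (d.getD c PySem.Set.empty) i)) d).getD c PySem.Set.empty
      ↔ x ∈ d.getD c PySem.Set.empty ∨ (c ∈ cs ∧ x = i) := by
  induction cs generalizing d with
  | nil => simp
  | cons a t ih =>
      simp only [List.foldl_cons, ih, List.mem_cons]
      rw [PySem.Dict.getD_insert]
      by_cases hc : c = a
      · subst hc; simp [PySem.Set.mem_add]; try tauto
      · simp [hc]; try tauto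

-- the built index: x ∈ rows[c] ↔ some enumerated row with index x contains c
theorem pv_mem_buildRows_aux (ls : List String) (s : Int) (d : PySem.Dict Char (PySem.Set Int))
    (c : Char) (x : Int) :
    x ∈ ((PySem.List.enumerate ls s).foldl
          (fun d p => p.2.toList.foldl
             (fun d c => d.insert c (PySem.Set.add (d.getD c PySem.Set.empty) p.1)) d) d).getD c PySem.Set.empty
      ↔ x ∈ d.getD c PySem.Set.empty ∨ ∃ p ∈ PySem.List.enumerate ls s, p.1 = x ∧ c ∈ p.2.toList := by
  induction ls generalizing s d with
  | nil => simp [PySem.List.enumerate_nil]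
  | cons a t ih =>
      rw [PySem.List.enumerate_cons]
      simp only [List.foldl_cons, ih, pv_mem_inner, List.mem_cons]
      constructor
      · rintro ((h | ⟨hc, hx⟩) | ⟨p, hp, h1, h2⟩)
        · exact Or.inl h
        · exact Or.inr ⟨(s, a), Or.inl rfl, hx.symm, hc⟩
        · exact Or.inr ⟨p, Or.inr hp, h1, h2⟩
      · rintro (h | ⟨p, hp | hp, h1, h2⟩)
        · exact Or.inl (Or.inl h)
        · subst hp; exact Or.inl (Or.inr ⟨h2, h1.symm⟩)
        · exact Or.inr ⟨p, hp, h1, h2⟩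

theorem pv_mem_buildRows (letters : List String) (c : Char) (x : Int) :
    x ∈ (pvBuildRows letters).getD c PySem.Set.empty
      ↔ ∃ p ∈ PySem.List.enumerate letters 0, p.1 = x ∧ c ∈ p.2.toList := by
  rw [pvBuildRows, pv_mem_buildRows_aux]
  simp [PySem.Set.empty, PySem.Dict.getD_empty]

theorem pv_A_false_iff (word : String) (letters : List String) :
    has_not_two_char_same_row word letters = false ↔ pvBad word letters := by
  unfold has_not_two_char_same_row pvBad
  simp only [Bool.not_eq_false', List.any_eq_true]
  constructor
  · rintro ⟨row, hrow, p, hp, hcond⟩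
    rw [PySem.List.mem_enumerate_iff] at hp
    obtain ⟨k, hk, rfl⟩ := hp
    simp only [zero_add] at hcond
    by_cases h0 : (k : Int) = 0
    · simp [h0] at hcond
    · have hk1 : 1 ≤ k := by omega
      simp only [h0, beq_iff_eq, if_false] at hcond
      have hcast : (k : Int) - 1 = ((k - 1 : Nat) : Int) := by omega
      rw [hcast, PySem.List.pyGet?_natCast] at hcond
      have hklt : k - 1 < word.toList.length := by omega
      rw [List.getElem?_eq_getElem hklt] at hcond
      obtain ⟨ha, hb⟩ := Bool.and_eq_true _ _ |>.mp hcond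
      refine ⟨row, hrow, k, hk1, hk, ?_, ?_⟩
      · rw [List.getD_eq_getElem _ _ hk]; exact List.contains_iff_mem.mp ha
      · rw [List.getD_eq_getElem _ _ hklt]; exact List.contains_iff_mem.mp hb
  · rintro ⟨row, hrow, k, hk1, hklt, h1, h2⟩
    refine ⟨row, hrow, ((k : Int), word.toList[k]), ?_, ?_⟩
    · rw [PySem.List.mem_enumerate_iff]
      exact ⟨k, hklt, by simp⟩
    · have h0 : ¬ ((k : Int) = 0) := by exact_mod_cast (by omega : ¬ k = 0)
      simp only [h0, beq_iff_eq, if_false]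
      have hcast : (k : Int) - 1 = ((k - 1 : Nat) : Int) := by omega
      have hklt' : k - 1 < word.toList.length := by omega
      rw [hcast, PySem.List.pyGet?_natCast, List.getElem?_eq_getElem hklt']
      rw [List.getD_eq_getElem _ _ hklt] at h1
      rw [List.getD_eq_getElem _ _ hklt'] at h2
      exact Bool.and_eq_true _ _ |>.mpr ⟨List.contains_iff_mem.mpr h1, List.contains_iff_mem.mpr h2⟩

-- two enumerate entries with the same index are the same entry
theorem pv_enumerate_inj (ls : List String) {p q : Int × String}
    (hp : p ∈ PySem.List.enumerate ls 0) (hq : q ∈ PySem.List.enumerate ls 0)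
    (h : p.1 = q.1) : p = q := by
  rw [PySem.List.mem_enumerate_iff] at hp hq
  obtain ⟨k, hk, rfl⟩ := hp
  obtain ⟨k', hk', rfl⟩ := hq
  simp only [zero_add] at h
  have : k = k' := by exact_mod_cast h
  subst this; rfl

theorem pv_B_false_iff (word : String) (letters : List String) :
    has_not_two_char_same_row_alt word letters = false ↔ pvBad word letters := by
  unfold pvBad has_not_two_char_same_row_alt
  rw [Bool.not_eq_false', List.any_eq_true]
  simp only [PySem.List.mem_pyRange_one, Bool.not_eq_eq_eq_not, Bool.not_true,
    List.isEmpty_eq_false_iff]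
  constructor
  · rintro ⟨j, ⟨hj1, hjlt⟩, hne⟩
    obtain ⟨x, hx⟩ := List.exists_mem_of_ne_nil _ hne
    rw [PySem.Set.mem_inter] at hx
    obtain ⟨hx1, hx2⟩ := hx
    rw [pv_mem_buildRows] at hx1 hx2
    obtain ⟨p, hp, hpx, hpc⟩ := hx1
    obtain ⟨q, hq, hqx, hqc⟩ := hx2
    have hpq : p = q := pv_enumerate_inj letters hp hq (by rw [hpx, hqx])
    subst hpq
    rw [PySem.List.mem_enumerate_iff] at hp
    obtain ⟨m, hm, rfl⟩ := hp
    set k : Nat := j.toNat with hkdef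
    have hk1 : 1 ≤ k := by omega
    have hklt : k < word.toList.length := by omega
    have hjk : j = (k : Int) := by omega
    rw [hjk] at hpc hqc
    rw [show (k : Int) - 1 = ((k - 1 : Nat) : Int) by omega] at hqc
    simp only [PySem.List.pyGetD_natCast] at hpc hqc
    exact ⟨letters[m], List.getElem_mem hm, k, hk1, hklt, hpc, hqc⟩
  · rintro ⟨row, hrow, k, hk1, hklt, h1, h2⟩
    obtain ⟨m, hm, rfl⟩ := List.mem_iff_getElem.mp hrow
    refine ⟨(k : Int), ⟨by omega, by omega⟩, ?_⟩
    intro hnil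
    have hx : (m : Int) ∈ PySem.Set.inter
        ((pvBuildRows letters).getD (PySem.List.pyGetD word.toList (k : Int) ' ') PySem.Set.empty)
        ((pvBuildRows letters).getD (PySem.List.pyGetD word.toList ((k : Int) - 1) ' ') PySem.Set.empty) := by
      rw [PySem.Set.mem_inter]
      rw [show (k : Int) - 1 = ((k - 1 : Nat) : Int) by omega]
      simp only [PySem.List.pyGetD_natCast]
      constructor
      · rw [pv_mem_buildRows]
        exact ⟨((m : Int), letters[m]), (PySem.List.mem_enumerate_iff _ _ _).mpr ⟨m, hm, by simp⟩, rfl, h1⟩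
      · rw [pv_mem_buildRows]
        exact ⟨((m : Int), letters[m]), (PySem.List.mem_enumerate_iff _ _ _).mpr ⟨m, hm, by simp⟩, rfl, h2⟩
    rw [hnil] at hx
    exact absurd hx (List.not_mem_nil)

-- ===== VERDICT (by name: the statement is the Claim_ definition above) =====
theorem has_not_two_char_same_row_spec : Claim_equal_has_not_two_char_same_row := by
  intro word letters _
  unfold Spec_has_not_two_char_same_row
  cases h : has_not_two_char_same_row_alt word letters
  · exact (pv_A_false_iff word letters).mpr ((pv_B_false_iff word letters).mp h)
  · cases hA : has_not_two_char_same_row word letters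
    · exact absurd ((pv_B_false_iff word letters).mpr ((pv_A_false_iff word letters).mp hA)) (by rw [h]; simp)
    · rfl
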